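-- pv_equiv track=rewrite | github.com/Ningrui-Li/ckb | makeMarkov.py | createMarkovMatrix
-- ===== SOURCE A (Python) =====
-- def createMarkovMatrix(trainText):
--     trainText = trainText.lower()
--     markovMatrix = [[0 for i in range(27)] for i in range(27)]
--     wrapAroundText = trainText + trainText[0]
--
--     for charCount in range (1, len(trainText)):
--         currentChar = trainText[charCount-1]
--         asciiCurrentChar = ord(currentChar)
--         nextChar = trainText[charCount]
--         asciiNextChar = ord(nextChar)
--
--         if (currentChar.isalpha() or currentChar == ' ') and (nextChar.isalpha() or nextChar == ' '):
--             if asciiCurrentChar == 32: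
--                 asciiCurrentChar = 123
--             if asciiNextChar == 32:
--                 asciiNextChar = 123
--             #print asciiCurrentChar
--             #print asciiNextChar
--             markovMatrix[asciiCurrentChar-ord('a')][asciiNextChar-ord('a')] += 1;
--
--     return markovMatrix
-- ===== SOURCE B (Python) =====
-- def createMarkovMatrix(trainText):
--     t = trainText.lower()
--     enc = ''.join(chr(27 * ((123 if a == ' ' else ord(a)) - 97)
--                       + ((123 if b == ' ' else ord(b)) - 97))
--                   for a, b in zip(t, t[1:])
--                   if (a.isalpha() or a == ' ') and (b.isalpha() or b == ' '))
--     return [[enc.count(chr(27 * i + j)) for j in range(27)]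
--             for i in range(27)]
-- ===== Notes on version B (the rewrite author's own statement) =====
-- stated objective: alternative
-- what changed: A makes one indexed pass mutating a 27x27 matrix in place; B never mutates a matrix: it encodes the valid remapped bigrams once as single characters of a string and then computes every matrix cell independently as enc.count(chr(27*i+j)).
-- outside the precondition, e.g. on createMarkovMatrix(''): A raises IndexError
import Mathlib
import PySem

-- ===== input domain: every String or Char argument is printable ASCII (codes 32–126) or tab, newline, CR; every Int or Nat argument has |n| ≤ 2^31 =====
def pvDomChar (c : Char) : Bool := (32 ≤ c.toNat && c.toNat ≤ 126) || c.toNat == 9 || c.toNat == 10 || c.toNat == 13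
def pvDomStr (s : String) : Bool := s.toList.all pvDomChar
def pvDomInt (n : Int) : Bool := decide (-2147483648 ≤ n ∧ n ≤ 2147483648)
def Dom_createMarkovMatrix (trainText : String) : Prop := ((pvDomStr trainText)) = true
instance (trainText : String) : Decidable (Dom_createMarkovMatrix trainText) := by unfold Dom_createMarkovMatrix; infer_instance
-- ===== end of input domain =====

-- B replaces A's single mutating pass over a 27x27 matrix by a staged computation: the
-- valid bigrams are encoded once as single characters of a string, then every matrix cell
-- is computed independently as a str.count of its character (objective: alternative).

-- ===== PORT A =====
-- 'markovMatrix[i][j] += 1' (the indices are in range 0..26 for the letter/space pairs A counts)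
def pvBump (m : List (List Int)) (i j : Int) : List (List Int) :=
  m.modify i.toNat (fun row => row.modify j.toNat (· + 1))

def createMarkovMatrix (trainText : String) : List (List Int) :=
  let t := PySem.Chars.lower trainText.toList
  let markovMatrix := List.replicate 27 (List.replicate 27 (0 : Int))
  -- the wrap-around concatenation of the text with its first character is computed and
  -- never used; its subscript raises IndexError exactly on the empty string (none here;
  -- excluded by Pre_createMarkovMatrix, the untouched matrix is returned as junk)
  match PySem.List.pyGet? t 0 with
  | none => markovMatrix
  | some _ =>
  (PySem.List.pyRange 1 (t.length : Int) 1).foldl (fun m k =>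
    let currentChar := PySem.List.pyGetD t (k - 1) ' '
    let asciiCurrentChar : Int := (currentChar.toNat : Int)
    let nextChar := PySem.List.pyGetD t k ' '
    let asciiNextChar : Int := (nextChar.toNat : Int)
    if (PySem.Chars.isalpha currentChar || currentChar == ' ')
        && (PySem.Chars.isalpha nextChar || nextChar == ' ') then
      let asciiCurrentChar := if asciiCurrentChar == 32 then 123 else asciiCurrentChar
      let asciiNextChar := if asciiNextChar == 32 then 123 else asciiNextChar
      pvBump m (asciiCurrentChar - 97) (asciiNextChar - 97)
    else m) markovMatrix

-- ===== PORT B =====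
-- the comprehension's filter condition and its remapped key
def pvValid (p : Char × Char) : Bool :=
  (PySem.Chars.isalpha p.1 || p.1 == ' ') && (PySem.Chars.isalpha p.2 || p.2 == ' ')

def pvKey (p : Char × Char) : Int × Int :=
  ((if p.1 == ' ' then (123 : Int) else (p.1.toNat : Int)),
   (if p.2 == ' ' then (123 : Int) else (p.2.toNat : Int)))

-- each valid bigram is encoded as the single character chr(27*(cur-97)+(next-97))
def pvEnc (k : Int × Int) : Char := Char.ofNat (27 * (k.1 - 97) + (k.2 - 97)).toNat

def createMarkovMatrix_alt (trainText : String) : List (List Int) :=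
  let t := PySem.Chars.lower trainText.toList
  -- ''.join of the encoded characters, kept as its list of characters; str.count of a
  -- single-character needle equals the count of that character in the list (exact)
  let enc := ((t.zip (PySem.List.slice t (some 1) none)).filter pvValid).map
    (fun p => pvEnc (pvKey p))
  (PySem.List.pyRange 0 27 1).map (fun i => (PySem.List.pyRange 0 27 1).map (fun j =>
    (PySem.List.count enc (Char.ofNat (27 * i + j).toNat) : Int)))

-- ===== PRECONDITION & SPEC =====
-- Pre_ excludes only the empty string, on which A raises IndexError.
def Pre_createMarkovMatrix (trainText : String) : Prop := trainText ≠ ""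
instance (trainText : String) : Decidable (Pre_createMarkovMatrix trainText) := by
  unfold Pre_createMarkovMatrix; infer_instance

def pvWitness_createMarkovMatrix : String := "ab cab"

def Spec_createMarkovMatrix (trainText : String) (out : List (List Int)) : Prop :=
  out = createMarkovMatrix_alt trainText
instance (trainText : String) (out : List (List Int)) : Decidable (Spec_createMarkovMatrix trainText out) := by
  unfold Spec_createMarkovMatrix; infer_instance

-- ===== CLAIM (what is proved, stated in full; the proofs are below) =====
def Claim_equal_createMarkovMatrix : Prop := ∀ (trainText : String), Dom_createMarkovMatrix trainText → Pre_createMarkovMatrix trainText → Spec_createMarkovMatrix trainText (createMarkovMatrix trainText)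

-- ===== LEMMAS AND PROOFS =====

-- the step of A's loop, as a function of the consecutive pair of characters
def pvStep (m : List (List Int)) (p : Char × Char) : List (List Int) :=
  if pvValid p then pvBump m ((pvKey p).1 - 97) ((pvKey p).2 - 97) else m

-- the list of remapped ordinal pairs both programs count
def pvPairs (l : List Char) : List (Int × Int) :=
  (((PySem.Chars.lower l).zip (PySem.Chars.lower l).tail).filter pvValid).map pvKey

lemma pv_lower_isalpha_bounds (l : List Char) (c : Char) (hm : c ∈ PySem.Chars.lower l)
    (ha : PySem.Chars.isalpha c = true) : 97 ≤ c.toNat ∧ c.toNat ≤ 122 := by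
  obtain ⟨d, -, rfl⟩ := List.mem_map.mp hm
  simp only [PySem.Chars.lowerChar] at ha ⊢
  by_cases hu : PySem.Chars.isupper d = true
  · have hb : 65 ≤ d.toNat ∧ d.toNat ≤ 90 := by
      simp [PySem.Chars.isupper, Char.le_def, UInt32.le_iff_toNat_le] at hu
      omega
    rw [if_pos hu]
    rw [Char.toNat_ofNat, if_pos (Or.inl (by omega))]
    omega
  · rw [if_neg hu]
    rw [if_neg hu] at ha
    unfold PySem.Chars.isalpha at ha
    rw [Bool.not_eq_true] at hu
    simp [hu] at ha
    simp [PySem.Chars.islower, Char.le_def, UInt32.le_iff_toNat_le] at ha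
    omega

lemma pv_char_bound (l : List Char) (c : Char) (hm : c ∈ PySem.Chars.lower l)
    (hv : (PySem.Chars.isalpha c || c == ' ') = true) :
    97 ≤ (if c == ' ' then (123 : Int) else (c.toNat : Int)) ∧
      (if c == ' ' then (123 : Int) else (c.toNat : Int)) ≤ 123 := by
  by_cases hs : (c == ' ') = true
  · simp [hs]
  · rw [if_neg hs]
    rw [Bool.not_eq_true] at hs
    simp [hs] at hv
    have := pv_lower_isalpha_bounds l c hm hv
    omega

lemma pv_key_bounds (l : List Char) (p : Char × Char)
    (hm : p ∈ (PySem.Chars.lower l).zip (PySem.Chars.lower l).tail)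
    (hv : pvValid p = true) :
    97 ≤ (pvKey p).1 ∧ (pvKey p).1 ≤ 123 ∧ 97 ≤ (pvKey p).2 ∧ (pvKey p).2 ≤ 123 := by
  obtain ⟨h1, h2⟩ := List.of_mem_zip hm
  have h2' : p.2 ∈ PySem.Chars.lower l := List.mem_of_mem_tail h2
  unfold pvValid at hv
  rw [Bool.and_eq_true] at hv
  have b1 := pv_char_bound l p.1 h1 hv.1
  have b2 := pv_char_bound l p.2 h2' hv.2
  exact ⟨b1.1, b1.2, b2.1, b2.2⟩

lemma pv_zip_tail_eq_map (t : List Char) :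
    t.zip t.tail = (List.range (t.length - 1)).map
      (fun (k : Nat) => (PySem.List.pyGetD t ((k : Int)) ' ', PySem.List.pyGetD t ((k : Int) + 1) ' ')) := by
  apply List.ext_getElem
  · simp [List.length_zip, List.length_tail]
  · intro i h1 h2
    have hlen : i < t.length - 1 := by simpa using h2
    have hi1 : i < t.length := by omega
    have hi2 : i + 1 < t.length := by omega
    simp only [List.getElem_zip, List.getElem_tail, List.getElem_map, List.getElem_range]
    have e1 : ((i : Int) + 1) = ((i + 1 : Nat) : Int) := by push_cast; ring
    rw [PySem.List.pyGetD_natCast, e1, PySem.List.pyGetD_natCast,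
      List.getD_eq_getElem _ _ hi1, List.getD_eq_getElem _ _ hi2]

lemma pv_foldl_pairs {β : Type} (t : List Char) (g : β → Char × Char → β) (init : β) :
    (PySem.List.pyRange 1 (t.length : Int) 1).foldl
      (fun m k => g m (PySem.List.pyGetD t (k - 1) ' ', PySem.List.pyGetD t k ' ')) init
    = (t.zip t.tail).foldl g init := by
  rw [PySem.List.pyRange_one, List.foldl_map, pv_zip_tail_eq_map t, List.foldl_map]
  have he : ((t.length : Int) - 1).toNat = t.length - 1 := by omega
  rw [he]
  have hf : (fun (m : β) (k : Nat) => g m (PySem.List.pyGetD t (1 + (k : Int) - 1) ' ', PySem.List.pyGetD t (1 + (k : Int)) ' '))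
      = (fun (m : β) (k : Nat) => g m (PySem.List.pyGetD t ((k : Int)) ' ', PySem.List.pyGetD t ((k : Int) + 1) ' ')) := by
    funext m k
    rw [show (1 : Int) + (k : Int) - 1 = (k : Int) by omega, show (1 : Int) + (k : Int) = (k : Int) + 1 by omega]
  rw [hf]

lemma pv_foldl_bump_count (ks : List (Int × Int))
    (hb : ∀ k ∈ ks, 97 ≤ k.1 ∧ k.1 ≤ 123 ∧ 97 ≤ k.2 ∧ k.2 ≤ 123) :
    ks.foldl (fun m k => pvBump m (k.1 - 97) (k.2 - 97))
        (List.replicate 27 (List.replicate 27 (0 : Int)))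
    = (PySem.List.pyRange 0 27 1).map (fun i => (PySem.List.pyRange 0 27 1).map (fun j =>
        (ks.count ((i + 97), (j + 97)) : Int))) := by
  induction ks using List.reverseRecOn with
  | nil => decide
  | append_singleton ks k ih =>
    have hk := hb k (by simp)
    have hks : ∀ k ∈ ks, 97 ≤ k.1 ∧ k.1 ≤ 123 ∧ 97 ≤ k.2 ∧ k.2 ≤ 123 :=
      fun x hx => hb x (by simp [hx])
    rw [List.foldl_append, ih hks]
    simp only [List.foldl_cons, List.foldl_nil]
    apply List.ext_getElem
    · simp [pvBump, PySem.List.length_pyRange_one]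
    · intro i hi1 hi2
      have hi : i < 27 := by
        simpa [pvBump, PySem.List.length_pyRange_one] using hi2
      unfold pvBump
      rw [List.getElem_modify]
      simp only [List.getElem_map, PySem.List.getElem_pyRange_one, zero_add]
      by_cases hci : (k.1 - 97).toNat = i
      · rw [if_pos hci]
        apply List.ext_getElem
        · simp [PySem.List.length_pyRange_one]
        · intro j hj1 hj2
          have hj : j < 27 := by
            simpa [PySem.List.length_pyRange_one] using hj2
          rw [List.getElem_modify]
          simp only [List.getElem_map, PySem.List.getElem_pyRange_one, zero_add]
          by_cases hcj : (k.2 - 97).toNat = j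
          · rw [if_pos hcj]
            have hkey : (((i : Int) + 97), ((j : Int) + 97)) = k := by
              obtain ⟨k1, k2⟩ := k
              have a1 : 97 ≤ k1 := hk.1
              have a2 : k1 ≤ 123 := hk.2.1
              have a3 : 97 ≤ k2 := hk.2.2.1
              simp only [Prod.mk.injEq]
              constructor <;> omega
            rw [hkey, List.count_append, List.count_singleton]
            simp
          · rw [if_neg hcj]
            have hkey : k ≠ (((i : Int) + 97), ((j : Int) + 97)) := by
              obtain ⟨k1, k2⟩ := k
              have a3 : 97 ≤ k2 := hk.2.2.1
              simp only [ne_eq, Prod.mk.injEq, not_and]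
              intro _
              omega
            rw [List.count_append, List.count_singleton, if_neg (by simp [hkey])]
            simp
      · rw [if_neg hci]
        apply List.ext_getElem
        · simp [PySem.List.length_pyRange_one]
        · intro j hj1 hj2
          have hj : j < 27 := by
            simpa [PySem.List.length_pyRange_one] using hj2
          simp only [List.getElem_map, PySem.List.getElem_pyRange_one, zero_add]
          have hkey : k ≠ (((i : Int) + 97), ((j : Int) + 97)) := by
            obtain ⟨k1, k2⟩ := k
            have a1 : 97 ≤ k1 := hk.1
            simp only [ne_eq, Prod.mk.injEq, not_and]
            intro h1
            exact absurd (show (k1 - 97).toNat = i by omega) hci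
          rw [List.count_append, List.count_singleton, if_neg (by simp [hkey])]
          simp

lemma pv_ascii_space (c : Char) : (((c.toNat : Int)) == 32) = (c == ' ') := by
  rw [Bool.beq_eq_decide_eq, Bool.beq_eq_decide_eq]
  apply decide_eq_decide.mpr
  constructor
  · intro h
    have hn : c.toNat = 32 := by omega
    have := congrArg Char.ofNat hn
    rwa [Char.ofNat_toNat] at this
  · rintro rfl
    decide

lemma pv_A_eval (l : List Char) :
    ((PySem.Chars.lower l).zip (PySem.Chars.lower l).tail).foldl pvStep
        (List.replicate 27 (List.replicate 27 (0 : Int)))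
    = (PySem.List.pyRange 0 27 1).map (fun i => (PySem.List.pyRange 0 27 1).map (fun j =>
        ((pvPairs l).count ((i + 97), (j + 97)) : Int))) := by
  have h1 : ((PySem.Chars.lower l).zip (PySem.Chars.lower l).tail).foldl pvStep
        (List.replicate 27 (List.replicate 27 (0 : Int)))
      = (pvPairs l).foldl (fun m k => pvBump m (k.1 - 97) (k.2 - 97))
        (List.replicate 27 (List.replicate 27 (0 : Int))) := by
    simp only [pvPairs]
    rw [show pvStep = (fun m p =>
        if pvValid p then pvBump m ((pvKey p).1 - 97) ((pvKey p).2 - 97) else m) from rfl]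
    rw [PySem.List.foldl_if_eq_foldl_filter, List.foldl_map]
  rw [h1]
  apply pv_foldl_bump_count
  intro k hk
  obtain ⟨p, hp, rfl⟩ := List.mem_map.mp hk
  exact pv_key_bounds l p (List.mem_of_mem_filter hp) (List.of_mem_filter hp)

-- A's loop body equals pvStep of the consecutive pair
lemma pv_body_eq (t : List Char) :
    (fun (m : List (List Int)) (k : Int) =>
      if (PySem.Chars.isalpha (PySem.List.pyGetD t (k - 1) ' ') || PySem.List.pyGetD t (k - 1) ' ' == ' ')
          && (PySem.Chars.isalpha (PySem.List.pyGetD t k ' ') || PySem.List.pyGetD t k ' ' == ' ') then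
        pvBump m
          ((if ((PySem.List.pyGetD t (k - 1) ' ').toNat : Int) == 32 then (123 : Int)
            else ((PySem.List.pyGetD t (k - 1) ' ').toNat : Int)) - 97)
          ((if ((PySem.List.pyGetD t k ' ').toNat : Int) == 32 then (123 : Int)
            else ((PySem.List.pyGetD t k ' ').toNat : Int)) - 97)
      else m)
    = (fun m k => pvStep m (PySem.List.pyGetD t (k - 1) ' ', PySem.List.pyGetD t k ' ')) := by
  funext m k
  simp only [pvStep, pvValid, pvKey, pv_ascii_space]

-- pvEnc maps distinct in-bounds keys to distinct characters, so counting the encoded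
-- character equals counting the key
lemma pv_enc_inj (a k : Int × Int)
    (ha : 97 ≤ a.1 ∧ a.1 ≤ 123 ∧ 97 ≤ a.2 ∧ a.2 ≤ 123)
    (hk : 97 ≤ k.1 ∧ k.1 ≤ 123 ∧ 97 ≤ k.2 ∧ k.2 ≤ 123)
    (h : pvEnc a = pvEnc k) : a = k := by
  unfold pvEnc at h
  have h2 := congrArg Char.toNat h
  rw [Char.toNat_ofNat, Char.toNat_ofNat,
    if_pos (by exact Or.inl (by omega)), if_pos (by exact Or.inl (by omega))] at h2
  obtain ⟨a1, a2⟩ := a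
  obtain ⟨k1, k2⟩ := k
  simp only at h2 ha hk ⊢
  simp only [Prod.mk.injEq]
  constructor <;> omega

lemma pv_count_map_enc (ks : List (Int × Int))
    (hb : ∀ x ∈ ks, 97 ≤ x.1 ∧ x.1 ≤ 123 ∧ 97 ≤ x.2 ∧ x.2 ≤ 123)
    (k : Int × Int) (hk : 97 ≤ k.1 ∧ k.1 ≤ 123 ∧ 97 ≤ k.2 ∧ k.2 ≤ 123) :
    (ks.map pvEnc).count (pvEnc k) = ks.count k := by
  induction ks with
  | nil => rfl
  | cons a ks ih =>
    have ha := hb a (by simp)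
    have hks : ∀ x ∈ ks, 97 ≤ x.1 ∧ x.1 ≤ 123 ∧ 97 ≤ x.2 ∧ x.2 ≤ 123 :=
      fun x hx => hb x (by simp [hx])
    simp only [List.map_cons, List.count_cons, ih hks]
    congr 1
    by_cases he : a = k
    · simp [he]
    · have hne : pvEnc a ≠ pvEnc k := fun hc => he (pv_enc_inj a k ha hk hc)
      simp [he, hne]

lemma pv_pairs_bounds (l : List Char) :
    ∀ x ∈ pvPairs l, 97 ≤ x.1 ∧ x.1 ≤ 123 ∧ 97 ≤ x.2 ∧ x.2 ≤ 123 := by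
  intro x hx
  obtain ⟨p, hp, rfl⟩ := List.mem_map.mp hx
  exact pv_key_bounds l p (List.mem_of_mem_filter hp) (List.of_mem_filter hp)

-- ===== VERDICT (by name: the statement is the Claim_ definition above) =====
theorem createMarkovMatrix_spec : Claim_equal_createMarkovMatrix := by
  intro s _ hpre
  unfold Spec_createMarkovMatrix
  simp only [createMarkovMatrix, createMarkovMatrix_alt, PySem.List.slice_from_one]
  have hne : s.toList ≠ [] := fun h => hpre (by simpa using congrArg String.ofList h)
  rcases hl : PySem.Chars.lower s.toList with _ | ⟨c, rest⟩
  · exact absurd (List.map_eq_nil_iff.mp hl) hne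
  · rw [show PySem.List.pyGet? (c :: rest) 0 = some c by
        simp [PySem.List.pyGet?, PySem.List.pyIdx?]]
    rw [← hl, pv_body_eq, pv_foldl_pairs, pv_A_eval]
    apply List.ext_getElem
    · simp
    · intro i hi1 hi2
      have hi : i < 27 := by simpa [PySem.List.length_pyRange_one] using hi1
      simp only [List.getElem_map, PySem.List.getElem_pyRange_one, zero_add]
      apply List.ext_getElem
      · simp
      · intro j hj1 hj2
        have hj : j < 27 := by simpa [PySem.List.length_pyRange_one] using hj1
        simp only [List.getElem_map, PySem.List.getElem_pyRange_one, zero_add,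
          PySem.List.count_eq]
        have he : Char.ofNat (27 * (i : Int) + (j : Int)).toNat
            = pvEnc ((i : Int) + 97, (j : Int) + 97) := by
          unfold pvEnc
          norm_num
        have h2 : (((PySem.Chars.lower s.toList).zip
              (PySem.Chars.lower s.toList).tail).filter pvValid).map
              (fun p => pvEnc (pvKey p))
            = (pvPairs s.toList).map pvEnc := by
          simp only [pvPairs, List.map_map]
          rfl
        rw [he, h2, pv_count_map_enc (pvPairs s.toList) (pv_pairs_bounds s.toList)
          ((i : Int) + 97, (j : Int) + 97)
          ⟨by omega, by omega, by omega, by omega⟩]
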